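-- pv_equiv track=rewrite | github.com/veerendra-poosala/ccbpCodes | ccbp_codes/Idp_preparation_series_1/RepeatedDigits.py | get_count_of_repeated_digits_in_str_num
-- ===== SOURCE A (Python) =====
-- def get_count_of_repeated_digits_in_str_num(str_num):
--     digit_list = list(str_num)
--     rep_digits_list = []
--     for digit in digit_list:
--         count = digit_list.count(digit)
--         if count > 1 and digit not in rep_digits_list:
--             rep_digits_list.append(digit)
--     rep =len(rep_digits_list)
--     return rep
-- ===== SOURCE B (Python) =====
-- def get_count_of_repeated_digits_in_str_num(str_num):
--     # Sort the characters, then one linear pass over maximal runs of equal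
--     # characters; each run of length >= 2 is one distinct repeated character.
--     s = sorted(str_num)
--     rep = 0
--     i = 0
--     n = len(s)
--     while i < n:
--         j = i + 1
--         while j < n and s[j] == s[i]:
--             j += 1
--         if j - i >= 2:
--             rep += 1
--         i = j
--     return rep
-- ===== Notes on version B (the rewrite author's own statement) =====
-- stated objective: faster
-- what changed: Replaced the quadratic loop that calls list.count and a linear membership scan for every character by sorting the characters once and counting maximal runs of length >= 2 in a single linear pass.
import Mathlib
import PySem

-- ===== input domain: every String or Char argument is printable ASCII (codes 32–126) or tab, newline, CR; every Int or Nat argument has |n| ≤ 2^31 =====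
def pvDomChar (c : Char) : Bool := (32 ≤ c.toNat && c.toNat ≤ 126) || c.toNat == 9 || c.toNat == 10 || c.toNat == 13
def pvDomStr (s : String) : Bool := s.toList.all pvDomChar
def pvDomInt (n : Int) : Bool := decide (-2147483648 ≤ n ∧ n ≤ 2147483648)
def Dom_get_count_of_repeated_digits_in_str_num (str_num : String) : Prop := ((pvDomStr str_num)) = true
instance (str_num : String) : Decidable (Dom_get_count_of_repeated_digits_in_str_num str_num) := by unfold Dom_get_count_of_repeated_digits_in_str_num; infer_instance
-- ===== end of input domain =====

-- B sorts the characters once and counts maximal runs of length ≥ 2 in one pass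
-- instead of A's repeated list.count scans (faster in a timing run's measurement).

-- ===== PORT A =====
def get_count_of_repeated_digits_in_str_num (str_num : String) : Int :=
  let digit_list := str_num.toList
  let rep_digits_list := digit_list.foldl
    (fun rep digit =>
      let count := PySem.List.count digit_list digit
      if 1 < count ∧ digit ∉ rep then rep ++ [digit] else rep)
    ([] : List Char)
  (rep_digits_list.length : Int)

-- ===== PORT B =====
-- the index-based while loops of Source B: the inner `while j < n and s[j] == s[i]` scan is
-- the takeWhile over the tail, `i = j` continues after the run (dropWhile)
def pvAltRuns : List Char → Int
  | [] => 0
  | c :: t =>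
      (if 2 ≤ (t.takeWhile (fun d => d == c)).length + 1 then 1 else 0)
        + pvAltRuns (t.dropWhile (fun d => d == c))
termination_by l => l.length
decreasing_by
  simp only [List.length_cons]
  exact Nat.lt_succ_of_le (t.length_dropWhile_le _)

def get_count_of_repeated_digits_in_str_num_alt (str_num : String) : Int :=
  pvAltRuns (PySem.List.sorted str_num.toList (fun x => x) false)

-- ===== PRECONDITION & SPEC =====
def Spec_get_count_of_repeated_digits_in_str_num (str_num : String) (out : Int) : Prop := out = get_count_of_repeated_digits_in_str_num_alt str_num
instance (str_num : String) (out : Int) : Decidable (Spec_get_count_of_repeated_digits_in_str_num str_num out) := by unfold Spec_get_count_of_repeated_digits_in_str_num; infer_instance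

-- ===== CLAIM (what is proved, stated in full; the proofs are below) =====
def Claim_equal_get_count_of_repeated_digits_in_str_num : Prop := ∀ (str_num : String), Dom_get_count_of_repeated_digits_in_str_num str_num → Spec_get_count_of_repeated_digits_in_str_num str_num (get_count_of_repeated_digits_in_str_num str_num)

-- ===== LEMMAS AND PROOFS =====

-- the common value: number of distinct characters of l occurring more than once
def pvRepCard (l : List Char) : Nat :=
  (l.toFinset.filter (fun c => 1 < l.count c)).card

-- A's fold accumulates exactly the distinct repeated characters
lemma pvAFold_mem (l : List Char) :
    ∀ (q rep : List Char), rep.Nodup →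
      (q.foldl (fun rep digit =>
          if 1 < PySem.List.count l digit ∧ digit ∉ rep then rep ++ [digit] else rep) rep).Nodup ∧
      ∀ c, c ∈ (q.foldl (fun rep digit =>
          if 1 < PySem.List.count l digit ∧ digit ∉ rep then rep ++ [digit] else rep) rep) ↔
        c ∈ rep ∨ (c ∈ q ∧ 1 < l.count c) := by
  intro q
  induction q with
  | nil => intro rep h; simpa using h
  | cons d t ih =>
      intro rep h
      simp only [List.foldl_cons]
      by_cases hd : 1 < PySem.List.count l d ∧ d ∉ rep
      · rw [if_pos hd]
        have hnd : (rep ++ [d]).Nodup := by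
          simp [List.nodup_append, h]
          exact fun a ha hda => hd.2 (hda ▸ ha)
        obtain ⟨h1, h2⟩ := ih (rep ++ [d]) hnd
        refine ⟨h1, fun c => ?_⟩
        rw [h2 c]
        simp only [List.mem_append, List.mem_cons, List.not_mem_nil, or_false]
        constructor
        · rintro ((hc | rfl) | ⟨hc, hcnt⟩)
          · exact Or.inl hc
          · exact Or.inr ⟨Or.inl rfl, by simpa [PySem.List.count] using hd.1⟩
          · exact Or.inr ⟨Or.inr hc, hcnt⟩
        · rintro (hc | ⟨(rfl | hc), hcnt⟩)
          · exact Or.inl (Or.inl hc)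
          · exact Or.inl (Or.inr rfl)
          · exact Or.inr ⟨hc, hcnt⟩
      · rw [if_neg hd]
        obtain ⟨h1, h2⟩ := ih rep h
        refine ⟨h1, fun c => ?_⟩
        rw [h2 c]
        simp only [List.mem_cons]
        constructor
        · rintro (hc | ⟨hc, hcnt⟩)
          · exact Or.inl hc
          · exact Or.inr ⟨Or.inr hc, hcnt⟩
        · rintro (hc | ⟨(rfl | hc), hcnt⟩)
          · exact Or.inl hc
          · -- d itself: since the branch was not taken, either count ≤ 1 (contradiction) or d ∈ rep
            rcases not_and_or.mp hd with hcnt' | hmem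
            · exact absurd (by simpa [PySem.List.count] using hcnt) hcnt'
            · exact Or.inl (by simpa using hmem)
          · exact Or.inr ⟨hc, hcnt⟩

lemma pvA_eq_repCard (l : List Char) :
    (l.foldl (fun rep digit =>
        if 1 < PySem.List.count l digit ∧ digit ∉ rep then rep ++ [digit] else rep)
      ([] : List Char)).length = pvRepCard l := by
  obtain ⟨hnd, hmem⟩ := pvAFold_mem l l [] List.nodup_nil
  set F := l.foldl (fun rep digit =>
      if 1 < PySem.List.count l digit ∧ digit ∉ rep then rep ++ [digit] else rep)
    ([] : List Char) with hF
  have hset : F.toFinset = l.toFinset.filter (fun c => 1 < l.count c) := by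
    ext c
    simp only [List.mem_toFinset, Finset.mem_filter]
    rw [hmem c]
    simp
  calc F.length = F.toFinset.card := (List.toFinset_card_of_nodup hnd).symm
    _ = pvRepCard l := by rw [hset]; rfl

-- counting runs in a (≤)-sorted list gives the number of distinct repeated characters
lemma pvNotMem_dropWhile (c : Char) : ∀ (t : List Char), t.Pairwise (· ≤ ·) → (∀ d ∈ t, c ≤ d) →
    c ∉ t.dropWhile (fun d => d == c) := by
  intro t
  induction t with
  | nil => simp
  | cons d t' ih =>
      intro hp hc
      rw [List.dropWhile_cons]
      by_cases hdc : (d == c) = true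
      · rw [if_pos hdc]
        exact ih (List.pairwise_cons.mp hp).2
          (fun e he => hc e (List.mem_cons_of_mem d he))
      · rw [if_neg hdc]
        intro hmem
        rcases List.mem_cons.mp hmem with h | h
        · exact hdc (by simp [h])
        · have h1 : d ≤ c := (List.pairwise_cons.mp hp).1 c h
          have h2 : c ≤ d := hc d List.mem_cons_self
          exact hdc (by simp [le_antisymm h1 h2])

lemma pvCount_self (c : Char) (run rest : List Char) (h1 : ∀ d ∈ run, d = c) (h2 : c ∉ rest) :
    (c :: (run ++ rest)).count c = run.length + 1 := by
  rw [List.count_cons_self, List.count_append]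
  have hr : run.count c = run.length := by
    rw [List.count_eq_length]; intro d hd; exact ((h1 d hd) ▸ rfl)
  rw [hr, List.count_eq_zero.mpr h2]

lemma pvCount_other (c d : Char) (hdc : d ≠ c) (run rest : List Char) (h1 : ∀ e ∈ run, e = c) :
    (c :: (run ++ rest)).count d = rest.count d := by
  have hz : run.count d = 0 := List.count_eq_zero.mpr (fun hmem => hdc (h1 d hmem))
  have hne : (c == d) = false := beq_eq_false_iff_ne.mpr hdc.symm
  rw [List.count_cons, List.count_append, hz, hne,
    if_neg (by decide : ¬ (false = true))]
  omega

lemma pvToFinset_split (c : Char) (run rest : List Char) (h1 : ∀ d ∈ run, d = c) :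
    (c :: (run ++ rest)).toFinset = insert c rest.toFinset := by
  ext d
  simp only [List.toFinset_cons, Finset.mem_insert, List.mem_toFinset, List.mem_append]
  constructor
  · rintro (rfl | h | h)
    · exact Or.inl rfl
    · exact Or.inl (h1 d h)
    · exact Or.inr h
  · rintro (rfl | h)
    · exact Or.inl rfl
    · exact Or.inr (Or.inr h)

lemma pvRepCard_split (c : Char) (run rest : List Char) (h1 : ∀ d ∈ run, d = c) (h2 : c ∉ rest) :
    pvRepCard (c :: (run ++ rest)) = (if 2 ≤ run.length + 1 then 1 else 0) + pvRepCard rest := by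
  unfold pvRepCard
  rw [pvToFinset_split c run rest h1, Finset.filter_insert]
  have hcard_rest : (rest.toFinset.filter (fun d => 1 < (c :: (run ++ rest)).count d)).card
      = (rest.toFinset.filter (fun d => 1 < rest.count d)).card := by
    congr 1
    apply Finset.filter_congr
    intro d hd
    have hdc : d ≠ c := fun h => h2 (h ▸ List.mem_toFinset.mp hd)
    rw [pvCount_other c d hdc run rest h1]
  by_cases hrr : 2 ≤ run.length + 1
  · have hcc : 1 < (c :: (run ++ rest)).count c := by
      rw [pvCount_self c run rest h1 h2]; omega
    rw [if_pos hcc, if_pos hrr,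
      Finset.card_insert_of_notMem (by
        simp only [Finset.mem_filter, List.mem_toFinset]
        exact fun h => h2 h.1)]
    omega
  · have hcc : ¬ 1 < (c :: (run ++ rest)).count c := by
      rw [pvCount_self c run rest h1 h2]; omega
    rw [if_neg hcc, if_neg hrr]
    simpa using hcard_rest

lemma pvAltRuns_eq_repCard_aux : ∀ (n : Nat) (s : List Char), s.length ≤ n → s.Pairwise (· ≤ ·) →
    pvAltRuns s = (pvRepCard s : Int) := by
  intro n
  induction n with
  | zero =>
      intro s hlen _
      have : s = [] := List.eq_nil_of_length_eq_zero (Nat.le_zero.mp hlen)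
      subst this; simp [pvAltRuns, pvRepCard]
  | succ n ih =>
    intro s hlen
    cases s with
    | nil => intro _; simp [pvAltRuns, pvRepCard]
    | cons c t =>
      intro hp
      have hsplit : t.takeWhile (fun d => d == c) ++ t.dropWhile (fun d => d == c) = t :=
        t.takeWhile_append_dropWhile
      have hrunall : ∀ d ∈ t.takeWhile (fun d => d == c), d = c := by
        intro d hd
        have := List.mem_takeWhile_imp hd
        simpa using this
      have hpt : t.Pairwise (· ≤ ·) := (List.pairwise_cons.mp hp).2
      have hcnotin : c ∉ t.dropWhile (fun d => d == c) :=
        pvNotMem_dropWhile c t hpt (List.pairwise_cons.mp hp).1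
      have hrestp : (t.dropWhile (fun d => d == c)).Pairwise (· ≤ ·) :=
        List.Pairwise.sublist (List.dropWhile_sublist _) hpt
      have hrlen : (t.dropWhile (fun d => d == c)).length ≤ n := by
        have h1 : (t.dropWhile (fun d => d == c)).length ≤ t.length := t.length_dropWhile_le _
        have h2 : t.length + 1 ≤ n + 1 := by simpa using hlen
        omega
      have hcardeq := pvRepCard_split c (t.takeWhile (fun d => d == c))
        (t.dropWhile (fun d => d == c)) hrunall hcnotin
      rw [hsplit] at hcardeq
      rw [pvAltRuns, ih _ hrlen hrestp, hcardeq]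
      push_cast
      ring

lemma pvAltRuns_eq_repCard (s : List Char) (hp : s.Pairwise (· ≤ ·)) :
    pvAltRuns s = (pvRepCard s : Int) :=
  pvAltRuns_eq_repCard_aux s.length s le_rfl hp

-- ===== VERDICT (by name: the statement is the Claim_ definition above) =====
theorem get_count_of_repeated_digits_in_str_num_spec : Claim_equal_get_count_of_repeated_digits_in_str_num := by
  intro str_num _
  show get_count_of_repeated_digits_in_str_num str_num = get_count_of_repeated_digits_in_str_num_alt str_num
  have hperm : (PySem.List.sorted str_num.toList (fun x => x) false).Perm str_num.toList :=
    PySem.List.sorted_perm str_num.toList (fun x => x) false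
  have hpair := PySem.List.sorted_pairwise str_num.toList (fun x => x)
  show ((str_num.toList.foldl (fun rep digit =>
      if 1 < PySem.List.count str_num.toList digit ∧ digit ∉ rep then rep ++ [digit] else rep)
      ([] : List Char)).length : Int)
    = pvAltRuns (PySem.List.sorted str_num.toList (fun x => x) false)
  rw [pvAltRuns_eq_repCard _ (by simpa using hpair)]
  rw [pvA_eq_repCard str_num.toList]
  congr 1
  unfold pvRepCard
  have h1 : (PySem.List.sorted str_num.toList (fun x => x) false).toFinset
      = str_num.toList.toFinset := by
    ext x; simp [List.mem_toFinset, hperm.mem_iff]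
  rw [h1]
  congr 1
  apply Finset.filter_congr
  intro d _
  rw [hperm.count_eq d]
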